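-- pv_equiv track=rewrite | github.com/biobenkj/torch-semimarkov | benchmarks/practical_demonstration/timit/timit_phoneme.py | labels_to_segments
-- ===== SOURCE A (Python) =====
-- from typing import Literal, NamedTuple
--
-- class SegmentAnnotation(NamedTuple):
--     """A segment with label (for metrics)."""
--
--     start: int
--     end: int
--     label: int
--
-- def labels_to_segments(labels: list[int]) -> list[SegmentAnnotation]:
--     """Convert label sequence to segments."""
--     if not labels:
--         return []
--
--     segments = []
--     current_label = labels[0]
--     current_start = 0
--
--     for i in range(1, len(labels)):
--         if labels[i] != current_label:
--             segments.append(SegmentAnnotation(current_start, i, current_label))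
--             current_label = labels[i]
--             current_start = i
--
--     segments.append(SegmentAnnotation(current_start, len(labels), current_label))
--     return segments
-- ===== SOURCE B (Python) =====
-- from typing import NamedTuple
--
-- class SegmentAnnotation(NamedTuple):
--     """A segment with label (for metrics)."""
--
--     start: int
--     end: int
--     label: int
--
-- def labels_to_segments(labels: list[int]) -> list["SegmentAnnotation"]:
--     """Convert label sequence to segments by scanning run by run (two-pointer)."""
--     n = len(labels)
--     segments = []
--     pos = 0
--     while pos < n:
--         end = pos + 1
--         while end < n and labels[end] == labels[pos]:
--             end += 1
--         segments.append(SegmentAnnotation(pos, end, labels[pos]))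
--         pos = end
--     return segments
-- ===== Notes on version B (the rewrite author's own statement) =====
-- stated objective: alternative
-- what changed: Replaced the single indexed pass that threads (segments, current_label, current_start) state through every element by a run-by-run two-pointer scan: an inner scan finds the end of each run and one segment is emitted per run, with no per-element state updates.
import Mathlib
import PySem

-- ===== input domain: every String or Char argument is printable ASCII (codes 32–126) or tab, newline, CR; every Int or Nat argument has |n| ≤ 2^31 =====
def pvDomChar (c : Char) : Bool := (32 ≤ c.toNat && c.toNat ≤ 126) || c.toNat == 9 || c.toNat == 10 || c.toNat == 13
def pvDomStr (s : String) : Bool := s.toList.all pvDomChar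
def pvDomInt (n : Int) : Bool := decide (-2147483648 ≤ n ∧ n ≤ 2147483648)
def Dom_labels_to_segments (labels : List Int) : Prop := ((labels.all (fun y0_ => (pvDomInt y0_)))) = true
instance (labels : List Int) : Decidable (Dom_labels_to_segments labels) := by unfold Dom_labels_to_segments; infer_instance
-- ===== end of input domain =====

-- B replaces A's single indexed pass threading (segments, current_label, current_start)
-- by a run-by-run two-pointer scan (alternative decomposition, same O(n) cost).

-- ===== PORT A =====
-- loop body of A's `for i in range(1, len(labels))`; state = (segments, current_label, current_start)
def stepA (labels : List Int) (s : List (Int × Int × Int) × Int × Int) (i : Int) :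
    List (Int × Int × Int) × Int × Int :=
  let x := PySem.List.pyGetD labels i 0
  if x ≠ s.2.1 then (s.1 ++ [(s.2.2, i, s.2.1)], x, i) else s

def labels_to_segments (labels : List Int) : List (Int × Int × Int) :=
  match labels with
  | [] => []
  | l0 :: _ =>
    let st := (PySem.List.pyRange 1 (labels.length : Int) 1).foldl (stepA labels) ([], l0, 0)
    st.1 ++ [(st.2.2, (labels.length : Int), st.2.1)]

-- ===== PORT B =====
-- inner `while end < n and labels[end] == labels[pos]` scan
def scanEnd (labels : List Int) (x : Int) (e : Nat) : Nat :=
  if h : e < labels.length ∧ PySem.List.pyGetD labels (e : Int) 0 = x then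
    scanEnd labels x (e + 1)
  else e
termination_by labels.length - e
decreasing_by omega

theorem le_scanEnd (labels : List Int) (x : Int) (e : Nat) : e ≤ scanEnd labels x e := by
  unfold scanEnd
  split
  · exact Nat.le_of_succ_le (le_scanEnd labels x (e + 1))
  · exact le_rfl
termination_by labels.length - e
decreasing_by omega

-- outer `while pos < n` loop
def goB (labels : List Int) (pos : Nat) : List (Int × Int × Int) :=
  if h : pos < labels.length then
    ((pos : Int), (scanEnd labels (PySem.List.pyGetD labels (pos : Int) 0) (pos + 1) : Int),
        PySem.List.pyGetD labels (pos : Int) 0)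
      :: goB labels (scanEnd labels (PySem.List.pyGetD labels (pos : Int) 0) (pos + 1))
  else []
termination_by labels.length - pos
decreasing_by
  have := le_scanEnd labels (PySem.List.pyGetD labels (pos : Int) 0) (pos + 1)
  omega

def labels_to_segments_alt (labels : List Int) : List (Int × Int × Int) :=
  goB labels 0

-- ===== PRECONDITION & SPEC =====
def Spec_labels_to_segments (labels : List Int) (out : List (Int × Int × Int)) : Prop := out = labels_to_segments_alt labels
instance (labels : List Int) (out : List (Int × Int × Int)) : Decidable (Spec_labels_to_segments labels out) := by unfold Spec_labels_to_segments; infer_instance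

-- ===== CLAIM (what is proved, stated in full; the proofs are below) =====
def Claim_equal_labels_to_segments : Prop := ∀ (labels : List Int), Dom_labels_to_segments labels → Spec_labels_to_segments labels (labels_to_segments labels)

-- ===== LEMMAS AND PROOFS =====

-- A's final 'segments.append(...(current_start, len(labels), current_label))' step, as a function of the loop state
def finishA (labels : List Int) (st : List (Int × Int × Int) × Int × Int) : List (Int × Int × Int) :=
  st.1 ++ [(st.2.2, (labels.length : Int), st.2.1)]

theorem scanEnd_le (labels : List Int) (x : Int) (e : Nat) (he : e ≤ labels.length) :
    scanEnd labels x e ≤ labels.length := by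
  unfold scanEnd
  split
  · exact scanEnd_le labels x (e + 1) (by omega)
  · exact he
termination_by labels.length - e
decreasing_by omega

theorem scanEnd_run (labels : List Int) (x : Int) (e : Nat) :
    ∀ j, e ≤ j → j < scanEnd labels x e → PySem.List.pyGetD labels (j : Int) 0 = x := by
  unfold scanEnd
  split
  · rename_i h
    intro j hj1 hj2
    rcases Nat.eq_or_lt_of_le hj1 with rfl | hj
    · exact h.2
    · exact scanEnd_run labels x (e + 1) j hj hj2
  · intro j hj1 hj2; omega
termination_by labels.length - e
decreasing_by omega

theorem scanEnd_stop (labels : List Int) (x : Int) (e : Nat)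
    (h : scanEnd labels x e < labels.length) :
    PySem.List.pyGetD labels (scanEnd labels x e : Int) 0 ≠ x := by
  by_cases hc : e < labels.length ∧ PySem.List.pyGetD labels (e : Int) 0 = x
  · rw [scanEnd, dif_pos hc] at h ⊢
    exact scanEnd_stop labels x (e + 1) h
  · rw [scanEnd, dif_neg hc] at h ⊢
    intro hx
    exact hc ⟨h, hx⟩
termination_by labels.length - e
decreasing_by omega

-- A's loop leaves its state unchanged across a stretch of indices whose labels all equal current_label
theorem fold_skip (labels : List Int) (p e : Nat) (cur start : Int)
    (segs : List (Int × Int × Int))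
    (hrun : ∀ j, p ≤ j → j < e → PySem.List.pyGetD labels (j : Int) 0 = cur) :
    (PySem.List.pyRange (p : Int) (e : Int) 1).foldl (stepA labels) (segs, cur, start)
      = (segs, cur, start) := by
  rcases Nat.lt_or_ge p e with h | h
  · rw [PySem.List.pyRange_one_cons (by exact_mod_cast h)]
    simp only [List.foldl_cons]
    have hx : stepA labels (segs, cur, start) (p : Int) = (segs, cur, start) := by
      simp [stepA, hrun p le_rfl h]
    rw [hx]
    have hc : ((p : Int) + 1) = ((p + 1 : Nat) : Int) := by push_cast; ring
    rw [hc]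
    exact fold_skip labels (p + 1) e cur start segs (fun j hj1 hj2 => hrun j (by omega) hj2)
  · rw [PySem.List.pyRange_one_eq_nil (by exact_mod_cast h)]
    rfl
termination_by e - p

-- main invariant: A's remaining loop from index pos+1, in the state current run (label labels[pos])
-- started at pos, produces exactly segs followed by B's segments for the suffix starting at pos
theorem main_run (labels : List Int) (pos : Nat) (hpos : pos < labels.length)
    (segs : List (Int × Int × Int)) :
    finishA labels ((PySem.List.pyRange ((pos : Int) + 1) (labels.length : Int) 1).foldl
        (stepA labels) (segs, PySem.List.pyGetD labels (pos : Int) 0, (pos : Int)))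
      = segs ++ goB labels pos := by
  rw [goB, dif_pos hpos]
  have h1 := le_scanEnd labels (PySem.List.pyGetD labels (pos : Int) 0) (pos + 1)
  have h2 := scanEnd_le labels (PySem.List.pyGetD labels (pos : Int) 0) (pos + 1) (by omega)
  have hrun := scanEnd_run labels (PySem.List.pyGetD labels (pos : Int) 0) (pos + 1)
  have hstop := scanEnd_stop labels (PySem.List.pyGetD labels (pos : Int) 0) (pos + 1)
  generalize hE : scanEnd labels (PySem.List.pyGetD labels (pos : Int) 0) (pos + 1) = e at h1 h2 hrun hstop ⊢
  have hc1 : ((pos : Int) + 1) = ((pos + 1 : Nat) : Int) := by push_cast; ring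
  rw [hc1, PySem.List.pyRange_one_append ((pos + 1 : Nat) : Int) (e : Int) (labels.length : Int)
      (by exact_mod_cast h1) (by exact_mod_cast h2),
    List.foldl_append,
    fold_skip labels (pos + 1) e _ _ segs (fun j hj1 hj2 => hrun j hj1 hj2)]
  rcases Nat.lt_or_ge e labels.length with hlt | hge
  · rw [PySem.List.pyRange_one_cons (by exact_mod_cast hlt)]
    simp only [List.foldl_cons]
    have hne := hstop hlt
    have hstep : stepA labels (segs, PySem.List.pyGetD labels (pos : Int) 0, (pos : Int)) (e : Int)
        = (segs ++ [((pos : Int), (e : Int), PySem.List.pyGetD labels (pos : Int) 0)],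
            PySem.List.pyGetD labels (e : Int) 0, (e : Int)) := by
      simp only [stepA]
      rw [if_pos hne]
    rw [hstep,
      main_run labels e hlt (segs ++ [((pos : Int), (e : Int), PySem.List.pyGetD labels (pos : Int) 0)])]
    simp
  · have heq : e = labels.length := le_antisymm h2 hge
    subst heq
    rw [PySem.List.pyRange_one_eq_nil le_rfl]
    have hgo : goB labels labels.length = [] := by
      rw [goB]
      simp
    rw [hgo]
    simp [finishA]
termination_by labels.length - pos
decreasing_by omega

theorem labels_to_segments_eq (labels : List Int) :
    labels_to_segments labels = labels_to_segments_alt labels := by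
  cases labels with
  | nil =>
    unfold labels_to_segments labels_to_segments_alt
    rw [goB]
    simp
  | cons l0 tl =>
    have h := main_run (l0 :: tl) 0 (by simp) []
    simp only [Nat.cast_zero, List.nil_append, zero_add, finishA] at h
    have hx : PySem.List.pyGetD (l0 :: tl) (0 : Int) 0 = l0 := by
      simp [PySem.List.pyGetD, PySem.List.pyIdx?, PySem.List.pyGet?]
    rw [hx] at h
    unfold labels_to_segments labels_to_segments_alt
    simpa using h

-- ===== VERDICT (by name: the statement is the Claim_ definition above) =====
theorem labels_to_segments_spec : Claim_equal_labels_to_segments := by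
  intro labels _
  unfold Spec_labels_to_segments
  exact labels_to_segments_eq labels
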